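-- pv_equiv track=rewrite | github.com/roshankraveendrababu/coding-files | contest_solutions/codeforces/was_there_an_array.py | build_a
-- ===== SOURCE A (Python) =====
-- def build_a(n,b):
--     arr=[1]
--     for i in range(len(b)):
--         val=arr[-1]
--         if b[i]==1:
--             arr.append(val)
--         else:
--             arr.append(val+1)
--     return arr
-- ===== SOURCE B (Python) =====
-- def build_a(n, b):
--     # Back-to-front: the last element is 1 + (number of non-1 descriptors);
--     # walk b in reverse, undoing each step, then reverse the collected list.
--     t = 1 + sum(1 for x in b if x != 1)
--     out = [t]
--     for x in reversed(b):
--         if x != 1: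
--             t -= 1
--         out.append(t)
--     out.reverse()
--     return out
-- ===== Notes on version B (the rewrite author's own statement) =====
-- stated objective: alternative
-- what changed: B builds the array back-to-front: it first computes the final value as 1 plus the count of non-1 descriptors, then walks b in reverse subtracting each step's delta and reverses the collected list, instead of A's forward loop that appends to and re-reads the tail of the growing array.
import Mathlib
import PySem

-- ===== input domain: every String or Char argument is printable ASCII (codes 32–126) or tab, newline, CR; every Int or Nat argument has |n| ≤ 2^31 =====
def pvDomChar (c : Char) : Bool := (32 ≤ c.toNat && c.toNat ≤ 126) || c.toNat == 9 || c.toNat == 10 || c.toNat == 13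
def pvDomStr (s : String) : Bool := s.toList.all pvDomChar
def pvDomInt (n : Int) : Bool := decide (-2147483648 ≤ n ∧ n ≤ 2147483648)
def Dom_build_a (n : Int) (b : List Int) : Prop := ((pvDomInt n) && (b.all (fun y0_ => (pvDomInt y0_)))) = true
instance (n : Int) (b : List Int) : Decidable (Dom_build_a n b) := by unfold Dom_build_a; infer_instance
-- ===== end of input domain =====

-- B builds the array back-to-front from the final total instead of A's forward append loop; same O(n) cost, different construction order.

-- ===== PORT A =====
def build_a (n : Int) (b : List Int) : List Int :=
  (PySem.List.pyRange 0 b.length 1).foldl (fun arr i =>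
    let val := PySem.List.pyGetD arr (-1) 0   -- arr[-1]; arr is never empty so no IndexError
    if PySem.List.pyGetD b i 0 == 1 then arr ++ [val] else arr ++ [val + 1]) [1]

-- ===== PORT B =====
def build_a_alt (n : Int) (b : List Int) : List Int :=
  let t : Int := 1 + b.foldl (fun s x => if x ≠ 1 then s + 1 else s) 0
  let st := b.reverse.foldl (fun (st : Int × List Int) x =>
    let t := if x ≠ 1 then st.1 - 1 else st.1
    (t, st.2 ++ [t])) (t, [t])
  st.2.reverse

-- ===== PRECONDITION & SPEC =====
def Spec_build_a (n : Int) (b : List Int) (out : List Int) : Prop := out = build_a_alt n b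
instance (n : Int) (b : List Int) (out : List Int) : Decidable (Spec_build_a n b out) := by unfold Spec_build_a; infer_instance

-- ===== CLAIM (what is proved, stated in full; the proofs are below) =====
def Claim_equal_build_a : Prop := ∀ (n : Int) (b : List Int), Dom_build_a n b → Spec_build_a n b (build_a n b)

-- ===== LEMMAS AND PROOFS =====

-- per-descriptor step: the array grows by this delta
def pvDelta (x : Int) : Int := if x = 1 then 0 else 1

-- the intended array starting from running value t
def pvSpec : Int → List Int → List Int
  | t, [] => [t]
  | t, x :: xs => t :: pvSpec (t + pvDelta x) xs

-- number of non-1 descriptors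
def pvCnt (b : List Int) : Int := (b.map pvDelta).sum

theorem pvCnt_foldl (b : List Int) : ∀ (s : Int),
    b.foldl (fun s x => if x ≠ 1 then s + 1 else s) s = s + pvCnt b := by
  induction b with
  | nil => intro s; simp [pvCnt]
  | cons x xs ih =>
    intro s
    rw [List.foldl_cons]
    rcases eq_or_ne x 1 with hx | hx
    · rw [if_neg (by simp [hx]), ih]
      simp [pvCnt, pvDelta, hx]
    · rw [if_pos hx, ih]
      simp only [pvCnt, List.map_cons, List.sum_cons, pvDelta, if_neg hx]
      ring

-- A's loop from accumulator pre ++ [t] produces pre ++ pvSpec t b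
theorem build_a_fwd (b : List Int) : ∀ (pre : List Int) (t : Int),
    b.foldl (fun arr x =>
        let val := PySem.List.pyGetD arr (-1) 0
        if x == 1 then arr ++ [val] else arr ++ [val + 1]) (pre ++ [t])
      = pre ++ pvSpec t b := by
  induction b with
  | nil => intro pre t; simp [pvSpec]
  | cons x xs ih =>
    intro pre t
    simp only [List.foldl_cons, PySem.List.pyGetD_neg_one_append_singleton]
    by_cases hx : x = 1
    · simpa [hx, pvSpec, pvDelta, List.append_assoc] using ih (pre ++ [t]) t
    · simpa [hx, pvSpec, pvDelta, List.append_assoc] using ih (pre ++ [t]) (t + 1)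

-- B's backward loop characterised: fold over b.reverse from (t, [t])
theorem build_a_back (b : List Int) : ∀ (t : Int),
    b.reverse.foldl (fun (st : Int × List Int) x =>
        let t := if x ≠ 1 then st.1 - 1 else st.1
        (t, st.2 ++ [t])) (t, [t])
      = (t - pvCnt b, (pvSpec (t - pvCnt b) b).reverse) := by
  induction b with
  | nil => intro t; simp [pvCnt, pvSpec]
  | cons x xs ih =>
    intro t
    rw [List.reverse_cons, List.foldl_append, ih t]
    rcases eq_or_ne x 1 with hx | hx
    · subst hx
      have hc : pvCnt ((1 : Int) :: xs) = pvCnt xs := by simp [pvCnt, pvDelta]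
      simp [pvSpec, hc, pvDelta]
    · have hc : pvCnt (x :: xs) = 1 + pvCnt xs := by simp [pvCnt, pvDelta, hx]
      have h1 : t - pvCnt (x :: xs) = t - pvCnt xs - 1 := by rw [hc]; ring
      have h2 : t - pvCnt xs - 1 + pvDelta x = t - pvCnt xs := by
        simp only [pvDelta, if_neg hx]; ring
      simp [hx, pvSpec, h1, h2]

-- ===== VERDICT (by name: the statement is the Claim_ definition above) =====
theorem build_a_spec : Claim_equal_build_a := by
  intro n b _
  unfold Spec_build_a build_a build_a_alt
  dsimp only
  rw [PySem.List.foldl_pyRange_zero_pyGetD' b 0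
    (fun arr x => let val := PySem.List.pyGetD arr (-1) 0
                  if x == 1 then arr ++ [val] else arr ++ [val + 1]) [1]]
  rw [pvCnt_foldl, build_a_back]
  have h : 1 + (0 + pvCnt b) - pvCnt b = 1 := by ring
  rw [h, List.reverse_reverse]
  exact build_a_fwd b [] 1
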